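-- pv_equiv track=rewrite | github.com/xiewu/airweave | monke/bongos/intercom.py | _build_ticket_attributes
-- ===== SOURCE A (Python) =====
-- from typing import Any, Dict, List, Optional
--
-- def _build_ticket_attributes(
--
--     attr_names: List[str],
--     title: str,
--     description: str,
-- ) -> Dict[str, Any]:
--     """Build ticket_attributes using only exact attribute names from the ticket type.
--
--     Maps our title/description to attributes whose name looks like Title/Description.
--     Does not use reserved keys default_title/default_description unless that exact
--     name exists on the type (API rejects keys not found on the type).
--     """
--     out: Dict[str, Any] = {}
--     for name in attr_names:
--         n = (name or "").strip().lower()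
--         if n and n in ("default_title", "title", "subject", "name"):
--             out[name] = title  # use exact name as key
--             break
--     for name in attr_names:
--         n = (name or "").strip().lower()
--         if n and n in ("default_description", "description", "body", "details"):
--             out[name] = description
--             break
--     return out
-- ===== SOURCE B (Python) =====
-- def _build_ticket_attributes(attr_names, title, description):
--     """Single pass that records the first title-like and first description-like
--     attribute name, with an early break once both are found."""
--     t = None
--     d = None
--     for name in attr_names:
--         n = (name or "").strip().lower()
--         if t is None and n in ("default_title", "title", "subject", "name"):
--             t = name
--         elif d is None and n in ("default_description", "description", "body", "details"):
--             d = name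
--         if t is not None and d is not None:
--             break
--     out = {}
--     if t is not None:
--         out[t] = title
--     if d is not None:
--         out[d] = description
--     return out
-- ===== Notes on version B (the rewrite author's own statement) =====
-- stated objective: alternative
-- what changed: A's two sequential first-match scans over attr_names (one for a title-like name, one for a description-like name) are replaced by a single pass that records both first matches in two option variables with an early break once both are found, assembling the dict afterwards.
import Mathlib
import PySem

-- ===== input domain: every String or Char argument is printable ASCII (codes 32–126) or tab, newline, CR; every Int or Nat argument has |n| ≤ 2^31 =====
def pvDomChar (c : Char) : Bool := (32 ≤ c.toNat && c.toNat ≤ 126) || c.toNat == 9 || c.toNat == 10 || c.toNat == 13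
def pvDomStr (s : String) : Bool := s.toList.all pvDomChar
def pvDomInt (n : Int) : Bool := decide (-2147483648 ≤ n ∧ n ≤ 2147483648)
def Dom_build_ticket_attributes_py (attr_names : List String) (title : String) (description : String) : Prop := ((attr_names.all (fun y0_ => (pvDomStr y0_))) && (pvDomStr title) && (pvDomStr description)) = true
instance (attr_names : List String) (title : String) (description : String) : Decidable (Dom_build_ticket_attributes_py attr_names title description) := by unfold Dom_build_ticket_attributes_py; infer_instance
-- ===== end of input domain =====

-- B replaces A's two sequential first-match scans by a single pass recording both first matches
-- (with an early break once both are found); objective: alternative decomposition, same cost.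

-- ===== PORT A =====
-- first loop of A: scan for a title-like name, insert and break at the first hit
def pvALoop1 (attrs : List String) (title : String) (out : PySem.Dict String String) : PySem.Dict String String :=
  match attrs with
  | [] => out
  | name :: rest =>
      let n := PySem.Str.lower (PySem.Str.strip name)
      if n ≠ "" ∧ (n = "default_title" ∨ n = "title" ∨ n = "subject" ∨ n = "name")
      then out.insert name title
      else pvALoop1 rest title out

-- second loop of A: scan for a description-like name, insert and break at the first hit
def pvALoop2 (attrs : List String) (description : String) (out : PySem.Dict String String) : PySem.Dict String String :=
  match attrs with
  | [] => out
  | name :: rest =>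
      let n := PySem.Str.lower (PySem.Str.strip name)
      if n ≠ "" ∧ (n = "default_description" ∨ n = "description" ∨ n = "body" ∨ n = "details")
      then out.insert name description
      else pvALoop2 rest description out

def build_ticket_attributes_py (attr_names : List String) (title : String) (description : String) : List (String × String) :=
  (pvALoop2 attr_names description (pvALoop1 attr_names title PySem.Dict.empty)).items

-- ===== PORT B =====
-- single pass of B: record the first title-like and first description-like names, break when both found
def pvBLoop (attrs : List String) (t d : Option String) : Option String × Option String :=
  match attrs with
  | [] => (t, d)
  | name :: rest =>
      let n := PySem.Str.lower (PySem.Str.strip name)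
      let td :=
        if t = none ∧ (n = "default_title" ∨ n = "title" ∨ n = "subject" ∨ n = "name")
        then (some name, d)
        else if d = none ∧ (n = "default_description" ∨ n = "description" ∨ n = "body" ∨ n = "details")
        then (t, some name)
        else (t, d)
      if td.1.isSome ∧ td.2.isSome then td else pvBLoop rest td.1 td.2

def build_ticket_attributes_py_alt (attr_names : List String) (title : String) (description : String) : List (String × String) :=
  let td := pvBLoop attr_names none none
  let out : PySem.Dict String String := PySem.Dict.empty
  let out := match td.1 with | some k => out.insert k title | none => out
  let out := match td.2 with | some k => out.insert k description | none => out
  out.items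

-- ===== PRECONDITION & SPEC =====
def Spec_build_ticket_attributes_py (attr_names : List String) (title : String) (description : String) (out : List (String × String)) : Prop := out = build_ticket_attributes_py_alt attr_names title description
instance (attr_names : List String) (title : String) (description : String) (out : List (String × String)) : Decidable (Spec_build_ticket_attributes_py attr_names title description out) := by unfold Spec_build_ticket_attributes_py; infer_instance

-- ===== CLAIM (what is proved, stated in full; the proofs are below) =====
def Claim_equal_build_ticket_attributes_py : Prop := ∀ (attr_names : List String) (title : String) (description : String), Dom_build_ticket_attributes_py attr_names title description → Spec_build_ticket_attributes_py attr_names title description (build_ticket_attributes_py attr_names title description)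

-- ===== LEMMAS AND PROOFS =====

def pvTHit (name : String) : Bool :=
  let n := PySem.Str.lower (PySem.Str.strip name)
  n == "default_title" || n == "title" || n == "subject" || n == "name"

def pvDHit (name : String) : Bool :=
  let n := PySem.Str.lower (PySem.Str.strip name)
  n == "default_description" || n == "description" || n == "body" || n == "details"

theorem pvTHit_iff (name : String) : pvTHit name = true ↔
    (PySem.Str.lower (PySem.Str.strip name) = "default_title" ∨
     PySem.Str.lower (PySem.Str.strip name) = "title" ∨
     PySem.Str.lower (PySem.Str.strip name) = "subject" ∨
     PySem.Str.lower (PySem.Str.strip name) = "name") := by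
  simp [pvTHit, or_assoc]

theorem pvDHit_iff (name : String) : pvDHit name = true ↔
    (PySem.Str.lower (PySem.Str.strip name) = "default_description" ∨
     PySem.Str.lower (PySem.Str.strip name) = "description" ∨
     PySem.Str.lower (PySem.Str.strip name) = "body" ∨
     PySem.Str.lower (PySem.Str.strip name) = "details") := by
  simp [pvDHit, or_assoc]

theorem pvTHit_ne_empty (name : String) (h : pvTHit name = true) :
    PySem.Str.lower (PySem.Str.strip name) ≠ "" := by
  rcases (pvTHit_iff name).mp h with h | h | h | h <;> simp [h]

theorem pvDHit_ne_empty (name : String) (h : pvDHit name = true) :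
    PySem.Str.lower (PySem.Str.strip name) ≠ "" := by
  rcases (pvDHit_iff name).mp h with h | h | h | h <;> simp [h]

theorem pvTHit_not_DHit (name : String) (h : pvTHit name = true) : pvDHit name = false := by
  rcases (pvTHit_iff name).mp h with h | h | h | h <;> simp [pvDHit, h]

theorem pvALoop1_eq (attrs : List String) (title : String) (out : PySem.Dict String String) :
    pvALoop1 attrs title out =
      match attrs.find? pvTHit with
      | none => out
      | some nm => out.insert nm title := by
  induction attrs with
  | nil => rfl
  | cons name rest ih =>
    by_cases h : pvTHit name = true
    · rw [pvALoop1, if_pos ⟨pvTHit_ne_empty name h, (pvTHit_iff name).mp h⟩,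
        List.find?_cons_of_pos h]
    · have h0 : pvTHit name = false := by simpa using h
      rw [pvALoop1, if_neg (fun hc => h ((pvTHit_iff name).mpr hc.2)),
        List.find?_cons_of_neg (by simp [h0]), ih]

theorem pvALoop2_eq (attrs : List String) (description : String) (out : PySem.Dict String String) :
    pvALoop2 attrs description out =
      match attrs.find? pvDHit with
      | none => out
      | some nm => out.insert nm description := by
  induction attrs with
  | nil => rfl
  | cons name rest ih =>
    by_cases h : pvDHit name = true
    · rw [pvALoop2, if_pos ⟨pvDHit_ne_empty name h, (pvDHit_iff name).mp h⟩,
        List.find?_cons_of_pos h]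
    · have h0 : pvDHit name = false := by simpa using h
      rw [pvALoop2, if_neg (fun hc => h ((pvDHit_iff name).mpr hc.2)),
        List.find?_cons_of_neg (by simp [h0]), ih]

theorem pvBLoop_eq (attrs : List String) (t d : Option String) :
    pvBLoop attrs t d = (t.or (attrs.find? pvTHit), d.or (attrs.find? pvDHit)) := by
  induction attrs generalizing t d with
  | nil => cases t <;> cases d <;> rfl
  | cons name rest ih =>
    simp only [pvBLoop]
    by_cases hT : pvTHit name = true
    · have hD := pvTHit_not_DHit name hT
      have hTp := (pvTHit_iff name).mp hT
      have hDp : ¬ (PySem.Str.lower (PySem.Str.strip name) = "default_description" ∨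
          PySem.Str.lower (PySem.Str.strip name) = "description" ∨
          PySem.Str.lower (PySem.Str.strip name) = "body" ∨
          PySem.Str.lower (PySem.Str.strip name) = "details") := by
        intro hc; rw [(pvDHit_iff name).mpr hc] at hD; cases hD
      rw [List.find?_cons_of_pos hT, List.find?_cons_of_neg (by simp [hD])]
      cases t <;> cases d <;> split_ifs <;> simp_all [ih]
    · have hT0 : pvTHit name = false := by simpa using hT
      have hTp : ¬ (PySem.Str.lower (PySem.Str.strip name) = "default_title" ∨
          PySem.Str.lower (PySem.Str.strip name) = "title" ∨
          PySem.Str.lower (PySem.Str.strip name) = "subject" ∨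
          PySem.Str.lower (PySem.Str.strip name) = "name") := by
        intro hc; rw [(pvTHit_iff name).mpr hc] at hT0; cases hT0
      rw [List.find?_cons_of_neg (by simp [hT0])]
      by_cases hD : pvDHit name = true
      · have hDp := (pvDHit_iff name).mp hD
        rw [List.find?_cons_of_pos hD]
        cases t <;> cases d <;> split_ifs <;> simp_all [ih]
      · have hD0 : pvDHit name = false := by simpa using hD
        have hDp : ¬ (PySem.Str.lower (PySem.Str.strip name) = "default_description" ∨
            PySem.Str.lower (PySem.Str.strip name) = "description" ∨
            PySem.Str.lower (PySem.Str.strip name) = "body" ∨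
            PySem.Str.lower (PySem.Str.strip name) = "details") := by
          intro hc; rw [(pvDHit_iff name).mpr hc] at hD0; cases hD0
        rw [List.find?_cons_of_neg (by simp [hD0])]
        cases t <;> cases d <;> split_ifs <;> simp_all [ih]

-- ===== VERDICT (by name: the statement is the Claim_ definition above) =====
theorem build_ticket_attributes_py_spec : Claim_equal_build_ticket_attributes_py := by
  intro attrs title description _
  show build_ticket_attributes_py attrs title description = _
  unfold build_ticket_attributes_py build_ticket_attributes_py_alt
  rw [pvALoop1_eq, pvALoop2_eq, pvBLoop_eq]
  cases hT : attrs.find? pvTHit <;> cases hD : attrs.find? pvDHit <;> simp
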